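-- pv_equiv track=rewrite | github.com/nikolaJovisic/hardware-recommender | component-classification/classification.py | separate_values
-- ===== SOURCE A (Python) =====
-- from typing import Dict, List, Tuple
--
-- def separate_values(values: List[int]) -> List[Tuple[int, int]]:
--     values.append(0)
--     separated_values = []
--     in_sequence = 0
--     for i, value in enumerate(values):
--         if in_sequence != 0 and value == 0:
--             separated_values.append((i-in_sequence, in_sequence))
--             in_sequence = 0
--         elif value != 0:
--             in_sequence += 1
--     values.pop(len(values)-1)
--
--     return separated_values
-- ===== SOURCE B (Python) =====
-- from typing import List, Tuple
--
-- def separate_values(values: List[int]) -> List[Tuple[int, int]]: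
--     pad = [0] + values + [0]
--     edges = [i for i, (a, b) in enumerate(zip(pad, pad[1:])) if (a != 0) != (b != 0)]
--     it = iter(edges)
--     return [(s, e - s) for s, e in zip(it, it)]
-- ===== Notes on version B (the rewrite author's own statement) =====
-- stated objective: alternative
-- what changed: Replaces A's run-length state machine (sentinel append/pop, in_sequence counter) by boundary detection: pad the list with zeros, collect the indices where adjacent elements differ in zeroness (transition edges), and pair consecutive edges into (start, end-start); values is never mutated.
import Mathlib
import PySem

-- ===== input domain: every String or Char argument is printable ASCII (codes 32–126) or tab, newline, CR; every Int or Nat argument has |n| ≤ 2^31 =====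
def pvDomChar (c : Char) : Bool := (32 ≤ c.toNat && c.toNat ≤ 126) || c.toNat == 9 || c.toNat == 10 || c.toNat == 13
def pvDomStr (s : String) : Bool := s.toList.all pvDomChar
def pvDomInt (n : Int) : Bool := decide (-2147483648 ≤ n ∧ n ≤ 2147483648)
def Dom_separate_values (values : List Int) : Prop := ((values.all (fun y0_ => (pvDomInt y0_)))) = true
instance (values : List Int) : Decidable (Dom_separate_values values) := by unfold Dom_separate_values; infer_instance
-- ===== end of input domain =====

-- B replaces A's run-length state machine by boundary detection: collect the transition
-- indices of the zero-padded list and pair them up (same return value; A's append/pop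
-- leaves `values` unchanged net, so this is a return-value equivalence).

-- ===== PORT A =====
-- the body of A's for-loop: state = (separated_values, in_sequence), p = (i, value)
def svStepA (st : List (Int × Int) × Int) (p : Int × Int) : List (Int × Int) × Int :=
  if st.2 ≠ 0 ∧ p.2 = 0 then (st.1 ++ [(p.1 - st.2, st.2)], 0)
  else if p.2 ≠ 0 then (st.1, st.2 + 1)
  else st

-- A appends a sentinel 0, scans enumerate(values), then pops the sentinel; the returned
-- value is the fold below.
def separate_values (values : List Int) : List (Int × Int) :=
  let values' := values ++ [0]
  ((PySem.List.enumerate values' 0).foldl svStepA ([], 0)).1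

-- ===== PORT B =====
-- zip(it, it) over the edge list: pair up consecutive elements, (s, e) ↦ (s, e - s)
def svPairUp : List Int → List (Int × Int)
  | a :: b :: rest => (a, b - a) :: svPairUp rest
  | _ => []

-- pad[1:] is ported as .tail (PySem.List.slice_from_one); enumerate(zip(pad, pad[1:]))
def separate_values_alt (values : List Int) : List (Int × Int) :=
  let pad : List Int := [0] ++ values ++ [0]
  let edges := ((PySem.List.enumerate (pad.zip pad.tail) 0).filter
      (fun p => decide (p.2.1 ≠ 0) != decide (p.2.2 ≠ 0))).map Prod.fst
  svPairUp edges

-- ===== PRECONDITION & SPEC =====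
def Spec_separate_values (values : List Int) (out : List (Int × Int)) : Prop := out = separate_values_alt values
instance (values : List Int) (out : List (Int × Int)) : Decidable (Spec_separate_values values out) := by unfold Spec_separate_values; infer_instance

-- ===== CLAIM (what is proved, stated in full; the proofs are below) =====
def Claim_equal_separate_values : Prop := ∀ (values : List Int), Dom_separate_values values → Spec_separate_values values (separate_values values)

-- ===== LEMMAS AND PROOFS =====

-- A's loop in recursive (difference-list) form.
def svLoopA : List Int → Int → Int → List (Int × Int)
  | [], _, _ => []
  | v :: vs, i, inseq =>
    if inseq ≠ 0 ∧ v = 0 then (i - inseq, inseq) :: svLoopA vs (i + 1) 0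
    else if v ≠ 0 then svLoopA vs (i + 1) (inseq + 1)
    else svLoopA vs (i + 1) inseq

theorem svFold_eq_loopA (l : List Int) (i inseq : Int) (acc : List (Int × Int)) :
    ((PySem.List.enumerate l i).foldl svStepA (acc, inseq)).1 = acc ++ svLoopA l i inseq := by
  induction l generalizing i inseq acc with
  | nil => simp [PySem.List.enumerate_nil, svLoopA]
  | cons v vs ih =>
    rw [PySem.List.enumerate_cons, List.foldl_cons]
    by_cases h1 : inseq ≠ 0 ∧ v = 0
    · rw [show svStepA (acc, inseq) (i, v) = (acc ++ [(i - inseq, inseq)], 0) from by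
        simp [svStepA, h1]]
      rw [ih, svLoopA, if_pos h1, List.append_assoc]
      rfl
    · by_cases h2 : v ≠ 0
      · rw [show svStepA (acc, inseq) (i, v) = (acc, inseq + 1) from by
          simp [svStepA, h2]]
        rw [ih, svLoopA, if_neg h1, if_pos h2]
      · rw [show svStepA (acc, inseq) (i, v) = (acc, inseq) from by
          simp [svStepA, h1, h2]]
        rw [ih, svLoopA, if_neg h1, if_neg h2]

-- the maximal prefix of vs whose key (v ≠ 0) is k: (its length, the rest)
def svTakeRun (k : Bool) : List Int → Int × List Int
  | [] => (0, [])
  | v :: vs => if decide (v ≠ 0) = k then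
      let r := svTakeRun k vs
      (r.1 + 1, r.2)
    else (0, v :: vs)

theorem svTakeRun_length_le (k : Bool) (vs : List Int) :
    (svTakeRun k vs).2.length ≤ vs.length := by
  induction vs with
  | nil => simp [svTakeRun]
  | cons v vs ih =>
    simp only [svTakeRun]
    split
    · exact le_trans ih (Nat.le_succ _)
    · simp

-- run decomposition reference form: one step per maximal run
def svRuns : List Int → Int → List (Int × Int)
  | [], _ => []
  | v :: vs, start =>
    let k := decide (v ≠ 0)
    let r := svTakeRun k vs
    let len := r.1 + 1
    (if k then [(start, len)] else []) ++ svRuns r.2 (start + len)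
termination_by l => l.length
decreasing_by
  exact Nat.lt_succ_of_le (svTakeRun_length_le _ _)

-- zero-run absorption: skipping a maximal zero prefix does not change the result.
theorem svRuns_zeroRun (vs : List Int) (j : Int) :
    svRuns vs j = svRuns (svTakeRun false vs).2 (j + (svTakeRun false vs).1) := by
  cases vs with
  | nil => simp [svTakeRun, svRuns]
  | cons w ws =>
    by_cases hw : w = 0
    · subst hw
      have ht : svTakeRun false ((0:Int) :: ws)
          = ((svTakeRun false ws).1 + 1, (svTakeRun false ws).2) := by
        simp [svTakeRun]
      rw [ht, svRuns]
      simp only [ne_eq, not_true_eq_false, decide_false, Bool.false_eq_true, if_false,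
        List.nil_append]
    · have ht : svTakeRun false (w :: ws) = (0, w :: ws) := by simp [svTakeRun, hw]
      rw [ht]
      simp

theorem svLoopA_eq_runs (l : List Int) :
    (∀ i : Int, svLoopA (l ++ [0]) i 0 = svRuns l i) ∧
    (∀ (i n : Int), 0 ≤ n →
      svLoopA (l ++ [0]) i (n + 1) =
        (i - (n + 1), (n + 1) + (svTakeRun true l).1) ::
          svRuns (svTakeRun true l).2 (i + (svTakeRun true l).1)) := by
  induction l with
  | nil =>
    constructor
    · intro i
      simp [svLoopA, svRuns]
    · intro i n hn
      have hne : n + 1 ≠ 0 := by omega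
      simp [svLoopA, svTakeRun, svRuns, hne]
  | cons v vs ih =>
    obtain ⟨ih1, ih2⟩ := ih
    by_cases hv : v = 0
    · subst hv
      have key : ∀ j : Int, svRuns ((0:Int) :: vs) j =
          svRuns (svTakeRun false vs).2 (j + ((svTakeRun false vs).1 + 1)) := by
        intro j
        rw [svRuns]
        simp only [ne_eq, not_true_eq_false, decide_false, Bool.false_eq_true, if_false,
          List.nil_append]
      have ht : svTakeRun true ((0:Int) :: vs) = (0, (0:Int) :: vs) := by
        simp [svTakeRun]
      constructor
      · intro i
        rw [List.cons_append, svLoopA, if_neg (by simp), if_neg (by simp)]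
        rw [ih1 (i + 1), key i, svRuns_zeroRun vs (i + 1)]
        congr 1
        ring
      · intro i n hn
        have hne : n + 1 ≠ 0 := by omega
        rw [List.cons_append, svLoopA, if_pos ⟨hne, rfl⟩]
        rw [ih1 (i + 1), ht]
        simp only [add_zero]
        rw [key i, svRuns_zeroRun vs (i + 1)]
        refine congrArg₂ List.cons rfl ?_
        congr 1
        ring
    · have ht : svTakeRun true (v :: vs)
          = ((svTakeRun true vs).1 + 1, (svTakeRun true vs).2) := by
        simp [svTakeRun, hv]
      constructor
      · intro i
        rw [List.cons_append, svLoopA, if_neg (by simp [hv]), if_pos hv]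
        rw [ih2 (i + 1) 0 le_rfl]
        rw [svRuns]
        simp only [ne_eq, hv, not_false_eq_true, decide_true]
        refine congrArg₂ List.cons ?_ ?_
        · simp only [Prod.mk.injEq]
          constructor <;> ring
        · congr 1
          ring
      · intro i n hn
        rw [List.cons_append, svLoopA, if_neg (by simp [hv]), if_pos hv]
        rw [ih2 (i + 1) (n + 1) (by omega), ht]
        refine congrArg₂ List.cons ?_ ?_
        · simp only [Prod.mk.injEq]
          constructor <;> ring
        · congr 1
          ring

-- B-side: recursive characterisation of the edge list
def svEdges (prev : Bool) : List Int → Int → List Int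
  | [], i => if prev then [i] else []
  | v :: vs, i => (if prev != decide (v ≠ 0) then [i] else []) ++ svEdges (decide (v ≠ 0)) vs (i + 1)

theorem svEdges_bridge (l : List Int) : ∀ (x : Int) (i : Int),
    (((PySem.List.enumerate ((x :: (l ++ [0])).zip (l ++ [0])) i).filter
        (fun p => decide (p.2.1 ≠ 0) != decide (p.2.2 ≠ 0))).map Prod.fst)
      = svEdges (decide (x ≠ 0)) l i := by
  induction l with
  | nil =>
    intro x i
    simp only [List.nil_append, List.zip_cons_cons, List.zip_nil_right,
      PySem.List.enumerate_cons, PySem.List.enumerate_nil, svEdges]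
    by_cases hx : x = 0 <;> simp [hx, List.filter]
  | cons v vs ih =>
    intro x i
    simp only [List.cons_append, List.zip_cons_cons, PySem.List.enumerate_cons,
      List.filter_cons, svEdges]
    by_cases hk : (decide (x ≠ 0) != decide (v ≠ 0)) = true
    · rw [if_pos hk, if_pos hk, List.map_cons, ih v (i + 1)]
      rfl
    · rw [if_neg hk, if_neg hk, List.nil_append, ih v (i + 1)]

theorem svPairUp_edges (l : List Int) :
    (∀ i : Int, svPairUp (svEdges false l i) = svRuns l i) ∧
    (∀ (i s : Int), svPairUp (s :: svEdges true l i) =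
      (s, i + (svTakeRun true l).1 - s) ::
        svRuns (svTakeRun true l).2 (i + (svTakeRun true l).1)) := by
  induction l with
  | nil =>
    constructor
    · intro i; simp [svEdges, svPairUp, svRuns]
    · intro i s; simp [svEdges, svPairUp, svTakeRun, svRuns]
  | cons v vs ih =>
    obtain ⟨ih1, ih2⟩ := ih
    by_cases hv : v = 0
    · subst hv
      have ht : svTakeRun true ((0:Int) :: vs) = (0, (0:Int) :: vs) := by
        simp [svTakeRun]
      have he1 : ∀ i : Int, svEdges false ((0:Int) :: vs) i = svEdges false vs (i + 1) := by
        intro i; simp [svEdges]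
      have he2 : ∀ i : Int, svEdges true ((0:Int) :: vs) i = i :: svEdges false vs (i + 1) := by
        intro i; simp [svEdges]
      have key : ∀ j : Int, svRuns ((0:Int) :: vs) j = svRuns vs (j + 1) := by
        intro j
        rw [svRuns]
        simp only [ne_eq, not_true_eq_false, decide_false, Bool.false_eq_true, if_false,
          List.nil_append]
        rw [svRuns_zeroRun vs (j + 1)]
        congr 1
        ring
      constructor
      · intro i
        rw [he1 i, ih1 (i + 1), key i]
      · intro i s
        rw [he2 i, svPairUp, ih1 (i + 1), ← key i, ht]
        simp
    · have ht : svTakeRun true (v :: vs)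
          = ((svTakeRun true vs).1 + 1, (svTakeRun true vs).2) := by
        simp [svTakeRun, hv]
      have he1 : ∀ i : Int, svEdges false (v :: vs) i = i :: svEdges true vs (i + 1) := by
        intro i; simp [svEdges, hv]
      have he2 : ∀ i : Int, svEdges true (v :: vs) i = svEdges true vs (i + 1) := by
        intro i; simp [svEdges, hv]
      constructor
      · intro i
        rw [he1 i, ih2 (i + 1) i, svRuns]
        simp only [ne_eq, hv, not_false_eq_true, decide_true, if_true,
          List.singleton_append]
        refine congrArg₂ List.cons ?_ ?_
        · congr 1
          ring
        · congr 1
          ring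
      · intro i s
        rw [he2 i, ih2 (i + 1) s, ht]
        refine congrArg₂ List.cons ?_ ?_
        · congr 1
          ring
        · congr 1
          ring

-- ===== VERDICT (by name: the statement is the Claim_ definition above) =====
theorem separate_values_spec : Claim_equal_separate_values := by
  intro values _
  unfold Spec_separate_values separate_values separate_values_alt
  rw [svFold_eq_loopA, List.nil_append, (svLoopA_eq_runs values).1 0]
  simp only [List.cons_append, List.nil_append, List.tail_cons]
  rw [svEdges_bridge values 0 0]
  simp only [ne_eq, not_true_eq_false, decide_false]
  exact ((svPairUp_edges values).1 0).symm
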